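-- pv_equiv track=rewrite | github.com/FlorisE/algorithms | BinaryGap.py | solution
-- ===== SOURCE A (Python) =====
-- def solution(N):
--     binStr = "{0:b}".format(N)
--     maxBinGap = 0
--     currentBinGap = 0
--     for c in binStr:
--         if c == '0':
--             currentBinGap += 1
--         else:
--             maxBinGap = max(maxBinGap, currentBinGap)
--             currentBinGap = 0
--     return maxBinGap
-- ===== SOURCE B (Python) =====
-- def solution(N):
--     segs = format(abs(N), "b").split("1")
--     return max((len(s) for s in segs[:-1]), default=0)
-- ===== Notes on version B (the rewrite author's own statement) =====
-- stated objective: simpler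
-- what changed: B splits the binary string on '1' and takes the max segment length (dropping the trailing-zeros segment) instead of scanning bit by bit with running counters.
import Mathlib
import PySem

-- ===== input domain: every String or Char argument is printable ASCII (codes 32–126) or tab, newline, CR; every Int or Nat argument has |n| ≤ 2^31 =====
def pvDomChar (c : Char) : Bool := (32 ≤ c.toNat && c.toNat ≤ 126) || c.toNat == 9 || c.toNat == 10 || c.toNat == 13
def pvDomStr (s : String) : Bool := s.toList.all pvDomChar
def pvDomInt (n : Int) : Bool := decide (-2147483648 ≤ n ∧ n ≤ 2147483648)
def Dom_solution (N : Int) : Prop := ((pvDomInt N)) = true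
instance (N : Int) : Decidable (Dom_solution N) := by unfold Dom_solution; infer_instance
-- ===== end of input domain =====

-- B splits the binary string on '1' and takes the max segment length (dropping the
-- trailing-zeros run after the last one) instead of scanning with running counters: simpler.

-- ===== PORT A =====
-- "{0:b}".format(N): binary digits of |N|, msb first, with '-' prefix for negative N.
def pyBinNat : Nat → List Char
  | 0 => []
  | n + 1 =>
    pyBinNat ((n + 1) / 2) ++ [if (n + 1) % 2 == 1 then '1' else '0']

def pyBin (n : Nat) : List Char := if n = 0 then ['0'] else pyBinNat n

def solution (N : Int) : Int :=
  let binStr : List Char := (if N < 0 then ['-'] else []) ++ pyBin N.natAbs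
  (binStr.foldl
    (fun (st : Int × Int) c =>
      if c = '0' then (st.1, st.2 + 1) else (max st.1 st.2, 0))
    (0, 0)).1

-- ===== PORT B =====
-- hand port of str.split("1")
def split1 : List Char → List (List Char)
  | [] => [[]]
  | c :: cs =>
    if c = '1' then [] :: split1 cs
    else
      match split1 cs with
      | s :: rest => (c :: s) :: rest
      | [] => [[c]]

def solution_alt (N : Int) : Int :=
  let segs := split1 (pyBin N.natAbs)
  (segs.dropLast.map (fun s => (s.length : Int))).foldr max 0

-- ===== PRECONDITION & SPEC =====
def Spec_solution (N : Int) (out : Int) : Prop := out = solution_alt N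
instance (N : Int) (out : Int) : Decidable (Spec_solution N out) := by unfold Spec_solution; infer_instance

-- ===== CLAIM (what is proved, stated in full; the proofs are below) =====
def Claim_equal_solution : Prop := ∀ (N : Int), Dom_solution N → Spec_solution N (solution N)

-- ===== LEMMAS AND PROOFS =====

-- common recursive specification of the max zero-gap, with the pending run length `cur`
def gSpec (cur : Int) : List Char → Int
  | [] => 0
  | c :: cs => if c = '0' then gSpec (cur + 1) cs else max cur (gSpec 0 cs)

theorem gSpec_nonneg (cs : List Char) : ∀ cur : Int, 0 ≤ cur → 0 ≤ gSpec cur cs := by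
  induction cs with
  | nil => intro cur h; simp [gSpec]
  | cons c cs ih =>
    intro cur h
    simp only [gSpec]
    split
    · exact ih _ (by omega)
    · exact le_trans h (le_max_left _ _)

-- A's loop computes max m (gSpec cur cs)
theorem foldl_eq_gSpec (cs : List Char) :
    ∀ m cur : Int, 0 ≤ m → 0 ≤ cur →
      (cs.foldl (fun (st : Int × Int) c =>
        if c = '0' then (st.1, st.2 + 1) else (max st.1 st.2, 0)) (m, cur)).1
      = max m (gSpec cur cs) := by
  induction cs with
  | nil => intro m cur hm _; simp [gSpec, max_eq_left hm]
  | cons c cs ih =>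
    intro m cur hm hc
    simp only [List.foldl, gSpec]
    by_cases h : c = '0'
    · simp [h, ih m (cur + 1) hm (by omega)]
    · simp only [h, if_false]
      rw [ih (max m cur) 0 (le_trans hm (le_max_left _ _)) le_rfl, max_assoc]

theorem split1_ne_nil (cs : List Char) : split1 cs ≠ [] := by
  cases cs with
  | nil => simp [split1]
  | cons c cs =>
    simp only [split1]
    split
    · simp
    · split <;> simp

-- B's value, with the pending prefix length `cur` added to the first segment
def bVal (cur : Int) (cs : List Char) : Int :=
  match (split1 cs).dropLast with
  | [] => 0
  | s :: rest => ((cur + s.length) :: rest.map (fun t => (t.length : Int))).foldr max 0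

theorem split1_one (cs : List Char) : split1 ('1' :: cs) = [] :: split1 cs := by
  simp [split1]

theorem split1_zero (cs : List Char) (s : List Char) (rest : List (List Char))
    (h : split1 cs = s :: rest) : split1 ('0' :: cs) = ('0' :: s) :: rest := by
  simp [split1, h]

theorem gSpec_eq_bVal (cs : List Char) (hok : ∀ c ∈ cs, c = '0' ∨ c = '1') :
    ∀ cur : Int, 0 ≤ cur → gSpec cur cs = bVal cur cs := by
  induction cs with
  | nil => intro cur _; simp [gSpec, bVal, split1]
  | cons c cs ih =>
    have hc : c = '0' ∨ c = '1' := hok c (by simp)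
    have hok' : ∀ x ∈ cs, x = '0' ∨ x = '1' := fun x hx => hok x (by simp [hx])
    intro cur hcur
    obtain ⟨s, rest, hsp⟩ := List.exists_cons_of_ne_nil (split1_ne_nil cs)
    rcases hc with h0 | h1
    · -- c = '0': the pending zero-run grows by one
      subst h0
      have hstep : gSpec cur ('0' :: cs) = gSpec (cur + 1) cs := by simp [gSpec]
      rw [hstep, ih hok' (cur + 1) (by omega)]
      unfold bVal
      rw [split1_zero cs s rest hsp, hsp]
      rcases rest with _ | ⟨t, rest'⟩
      · simp
      · simp only [show (('0'::s) :: t :: rest').dropLast = ('0'::s) :: (t :: rest').dropLast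
            from by simp [List.dropLast],
          show (s :: t :: rest').dropLast = s :: (t :: rest').dropLast from by simp [List.dropLast],
          List.foldr_cons]
        congr 1
        simp only [List.length_cons]
        push_cast
        ring
    · -- c = '1': a separator completes the pending run of length cur
      subst h1
      have hstep : gSpec cur ('1' :: cs) = max cur (gSpec 0 cs) := by simp [gSpec]
      rw [hstep, ih hok' 0 le_rfl]
      unfold bVal
      rw [split1_one cs, hsp]
      rcases rest with _ | ⟨t, rest'⟩
      · simp [max_eq_left hcur]
      · simp only [show ([] :: s :: t :: rest').dropLast = [] :: (s :: t :: rest').dropLast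
            from by simp [List.dropLast],
          show (s :: t :: rest').dropLast = s :: (t :: rest').dropLast from by simp [List.dropLast],
          List.foldr_cons]
        simp

theorem pyBinNat_ok : ∀ n : Nat, ∀ c ∈ pyBinNat n, c = '0' ∨ c = '1' := by
  intro n
  induction n using Nat.strong_induction_on with
  | _ n ih =>
    match n with
    | 0 => intro c hc; simp [pyBinNat] at hc
    | n + 1 =>
      intro c hc
      rw [pyBinNat] at hc
      rcases List.mem_append.mp hc with h | h
      · exact ih ((n + 1) / 2) (Nat.div_lt_self (Nat.succ_pos n) (by omega)) c h
      · simp only [List.mem_singleton] at h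
        subst h
        split <;> simp

theorem pyBin_ok (n : Nat) : ∀ c ∈ pyBin n, c = '0' ∨ c = '1' := by
  intro c hc
  unfold pyBin at hc
  split at hc
  · simp at hc; subst hc; left; rfl
  · exact pyBinNat_ok n c hc

theorem bVal_zero (cs : List Char) :
    bVal 0 cs = ((split1 cs).dropLast.map (fun s => (s.length : Int))).foldr max 0 := by
  unfold bVal
  rcases h : (split1 cs).dropLast with _ | ⟨s, rest⟩
  · simp
  · simp

-- ===== VERDICT (by name: the statement is the Claim_ definition above) =====
theorem solution_spec : Claim_equal_solution := by
  unfold Claim_equal_solution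
  intro N _
  unfold Spec_solution solution solution_alt
  simp only []
  rw [← bVal_zero, ← gSpec_eq_bVal (pyBin N.natAbs) (pyBin_ok _) 0 le_rfl]
  by_cases hN : N < 0
  · simp only [if_pos hN, List.singleton_append, List.foldl_cons,
      if_neg (by decide : ¬ ('-' : Char) = '0'), max_self]
    rw [foldl_eq_gSpec _ 0 0 le_rfl le_rfl]
    simp [max_eq_right (gSpec_nonneg _ 0 le_rfl)]
  · simp only [if_neg hN, List.nil_append]
    rw [foldl_eq_gSpec _ 0 0 le_rfl le_rfl]
    simp [max_eq_right (gSpec_nonneg _ 0 le_rfl)]
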